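-- pv_equiv track=rewrite | github.com/n1kdo/Prolaser-III | prolaser_protocol.py | de_escape_message
-- ===== SOURCE A (Python) =====
-- MESSAGE_ESCAPE = 0x10
--
-- def de_escape_message(message):
--     result = []
--     escaped = False
--     for b in message:
--         if b == MESSAGE_ESCAPE:
--             if escaped:
--                 result.append(b)
--                 escaped = False
--             else:
--                 escaped = True
--         else:
--             escaped = False
--             result.append(b)
--     return result
-- ===== SOURCE B (Python) =====
-- MESSAGE_ESCAPE = 0x10
--
-- def de_escape_message(message):
--     # index-driven loop with one-byte lookahead instead of a carried 'escaped' flag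
--     result = []
--     i = 0
--     n = len(message)
--     while i < n:
--         b = message[i]
--         if b == MESSAGE_ESCAPE:
--             if i + 1 < n and message[i + 1] == MESSAGE_ESCAPE:
--                 result.append(MESSAGE_ESCAPE)
--                 i += 2
--             else:
--                 i += 1  # drop lone escape
--         else:
--             result.append(b)
--             i += 1
--     return result
-- ===== Notes on version B (the rewrite author's own statement) =====
-- stated objective: alternative
-- what changed: Replaced the flag-based state machine (a carried 'escaped' boolean reset on every byte) with an index-driven while loop that consumes escape pairs directly via one-byte lookahead.
import Mathlib
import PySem

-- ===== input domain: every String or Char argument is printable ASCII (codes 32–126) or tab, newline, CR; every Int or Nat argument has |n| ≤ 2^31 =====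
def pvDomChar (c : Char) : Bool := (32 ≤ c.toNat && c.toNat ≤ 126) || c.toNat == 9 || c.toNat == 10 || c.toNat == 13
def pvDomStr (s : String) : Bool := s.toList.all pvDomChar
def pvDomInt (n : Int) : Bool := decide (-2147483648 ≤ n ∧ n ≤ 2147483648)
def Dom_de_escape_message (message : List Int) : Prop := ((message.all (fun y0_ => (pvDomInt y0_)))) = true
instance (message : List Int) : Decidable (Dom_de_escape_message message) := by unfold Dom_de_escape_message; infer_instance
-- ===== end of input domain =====

-- B replaces A's carried 'escaped' flag with an index-driven loop using one-byte lookahead; same return value.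
-- ===== PORT A =====
def MESSAGE_ESCAPE : Int := 0x10

-- the for-loop of A: state is (result, escaped)
def deEscapeStep (st : List Int × Bool) (b : Int) : List Int × Bool :=
  if b = MESSAGE_ESCAPE then
    if st.2 then (st.1 ++ [b], false) else (st.1, true)
  else (st.1 ++ [b], false)

def de_escape_message (message : List Int) : List Int :=
  (message.foldl deEscapeStep ([], false)).1

-- ===== PORT B =====
-- B's while loop over indices, transcribed as structural recursion on the remaining suffix
def deEscapeLook : List Int → List Int
  | [] => []
  | b :: rest =>
    if b = MESSAGE_ESCAPE then
      match rest with
      | c :: rest2 =>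
        if c = MESSAGE_ESCAPE then MESSAGE_ESCAPE :: deEscapeLook rest2
        else deEscapeLook (c :: rest2)
      | [] => []
    else b :: deEscapeLook rest

def de_escape_message_alt (message : List Int) : List Int := deEscapeLook message

-- ===== PRECONDITION & SPEC =====
def Spec_de_escape_message (message : List Int) (out : List Int) : Prop := out = de_escape_message_alt message
instance (message : List Int) (out : List Int) : Decidable (Spec_de_escape_message message out) := by unfold Spec_de_escape_message; infer_instance

-- ===== CLAIM (what is proved, stated in full; the proofs are below) =====
def Claim_equal_de_escape_message : Prop := ∀ (message : List Int), Dom_de_escape_message message → Spec_de_escape_message message (de_escape_message message)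

-- ===== LEMMAS AND PROOFS =====

-- unfolding equations for B's lookahead recursion
theorem look_esc_nil : deEscapeLook [MESSAGE_ESCAPE] = [] := by
  rw [deEscapeLook.eq_def]; simp [MESSAGE_ESCAPE]

theorem look_esc_esc (rest : List Int) :
    deEscapeLook (MESSAGE_ESCAPE :: MESSAGE_ESCAPE :: rest) = MESSAGE_ESCAPE :: deEscapeLook rest := by
  rw [deEscapeLook.eq_def]; simp [MESSAGE_ESCAPE]

theorem look_esc_ne (c : Int) (rest : List Int) (hc : c ≠ MESSAGE_ESCAPE) :
    deEscapeLook (MESSAGE_ESCAPE :: c :: rest) = deEscapeLook (c :: rest) := by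
  rw [deEscapeLook.eq_def]
  simp only [MESSAGE_ESCAPE] at hc
  simp [MESSAGE_ESCAPE, hc]

theorem look_cons_ne (b : Int) (rest : List Int) (hb : b ≠ MESSAGE_ESCAPE) :
    deEscapeLook (b :: rest) = b :: deEscapeLook rest := by
  rw [deEscapeLook.eq_def]
  simp only [MESSAGE_ESCAPE] at hb
  simp [MESSAGE_ESCAPE, hb]

-- invariant of A's fold: the accumulated result is acc followed by B's answer on the
-- remaining suffix, with a pending escape re-prepended when the flag is set
theorem deEscape_fold_eq (msg : List Int) : ∀ (acc : List Int) (e : Bool),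
    (msg.foldl deEscapeStep (acc, e)).1
      = acc ++ deEscapeLook (if e then MESSAGE_ESCAPE :: msg else msg) := by
  induction msg with
  | nil =>
    intro acc e
    cases e <;> simp [deEscapeLook, look_esc_nil]
  | cons b rest ih =>
    intro acc e
    by_cases hb : b = MESSAGE_ESCAPE
    · subst hb
      cases e with
      | false =>
        simp only [List.foldl_cons, deEscapeStep, Bool.false_eq_true,
          if_false, if_true]
        rw [ih acc true]
        simp
      | true =>
        simp only [List.foldl_cons, deEscapeStep, if_true]
        rw [ih (acc ++ [MESSAGE_ESCAPE]) false]
        simp [look_esc_esc]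
    · cases e with
      | false =>
        simp only [List.foldl_cons, deEscapeStep, if_neg hb, Bool.false_eq_true, if_false]
        rw [ih (acc ++ [b]) false]
        simp [look_cons_ne b rest hb]
      | true =>
        simp only [List.foldl_cons, deEscapeStep, if_neg hb, if_true]
        rw [ih (acc ++ [b]) false]
        simp [look_esc_ne b rest hb, look_cons_ne b rest hb]


-- ===== VERDICT (by name: the statement is the Claim_ definition above) =====
theorem de_escape_message_spec : Claim_equal_de_escape_message := by
  intro message _
  unfold Spec_de_escape_message de_escape_message de_escape_message_alt
  rw [deEscape_fold_eq message [] false]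
  simp
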